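-- pv_equiv track=rewrite | github.com/vnddddd/mysqlbk-dk | src/database_parser.py | get_connection_groups
-- ===== SOURCE A (Python) =====
-- from typing import List, Dict, Any
--
-- def get_connection_groups(connections: List[Dict[str, Any]]) -> Dict[str, List[Dict[str, Any]]]:
--     """按组名分组连接"""
--     groups = {}
--     for conn in connections:
--         group_name = conn.get('group_name', 'Default')
--         if group_name not in groups:
--             groups[group_name] = []
--         groups[group_name].append(conn)
--     return groups
-- ===== SOURCE B (Python) =====
-- from typing import List, Dict, Any
--
-- def get_connection_groups(connections: List[Dict[str, Any]]) -> Dict[str, List[Dict[str, Any]]]: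
--     """按组名分组连接: collect distinct group names in first-occurrence order, then filter per name."""
--     key = lambda c: c.get('group_name', 'Default')
--     names = list(dict.fromkeys(key(c) for c in connections))
--     return {name: [c for c in connections if key(c) == name] for name in names}
-- ===== Notes on version B (the rewrite author's own statement) =====
-- stated objective: alternative
-- what changed: Replaces the single-pass dict-bucket loop with a two-phase decomposition: first an ordered dedup of the key values, then one filter pass per distinct group name building the result dict by comprehension.
import Mathlib
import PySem

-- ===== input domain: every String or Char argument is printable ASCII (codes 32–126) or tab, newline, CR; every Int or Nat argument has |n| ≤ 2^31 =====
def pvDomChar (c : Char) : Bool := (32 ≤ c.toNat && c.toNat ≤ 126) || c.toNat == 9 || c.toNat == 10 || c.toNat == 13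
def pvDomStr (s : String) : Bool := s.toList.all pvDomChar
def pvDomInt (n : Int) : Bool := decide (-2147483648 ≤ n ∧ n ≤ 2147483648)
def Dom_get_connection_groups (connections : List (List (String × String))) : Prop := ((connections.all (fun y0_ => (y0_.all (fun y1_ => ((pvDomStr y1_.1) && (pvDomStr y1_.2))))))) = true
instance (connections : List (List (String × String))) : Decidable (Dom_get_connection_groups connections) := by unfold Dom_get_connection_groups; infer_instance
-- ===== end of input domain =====

-- B replaces A's single-pass dict-bucket loop by an ordered dedup of the group names followed by
-- one filter pass per name (objective: alternative decomposition; not faster).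

-- ===== PORT A =====
-- literal port of A: one fold over connections keeping a Dict of buckets; the result is the dict's items
def get_connection_groups (connections : List (List (String × String))) : List (String × List (List (String × String))) :=
  (connections.foldl
    (fun groups conn =>
      let group_name := (PySem.Dict.mk conn).getD "group_name" "Default"
      let groups := if groups.contains group_name then groups else groups.insert group_name []
      groups.modify group_name [] (fun l => l ++ [conn]))
    PySem.Dict.empty).items

-- ===== PORT B =====
-- B-side helper: the key function c.get('group_name', 'Default')
def pvKey (c : List (String × String)) : String := (PySem.Dict.mk c).getD "group_name" "Default"

def get_connection_groups_alt (connections : List (List (String × String))) : List (String × List (List (String × String))) :=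
  let names := PySem.List.dedup (connections.map pvKey)
  names.map (fun n => (n, connections.filter (fun c => pvKey c == n)))

-- ===== PRECONDITION & SPEC =====
def Spec_get_connection_groups (connections : List (List (String × String))) (out : List (String × List (List (String × String)))) : Prop := out = get_connection_groups_alt connections
instance (connections : List (List (String × String))) (out : List (String × List (List (String × String)))) : Decidable (Spec_get_connection_groups connections out) := by unfold Spec_get_connection_groups; infer_instance

-- ===== CLAIM (what is proved, stated in full; the proofs are below) =====
def Claim_equal_get_connection_groups : Prop := ∀ (connections : List (List (String × String))), Dom_get_connection_groups connections → Spec_get_connection_groups connections (get_connection_groups connections)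

-- ===== LEMMAS AND PROOFS =====

-- A's loop body (ensure-key-then-append) is the dict 'modify with default []'
theorem pv_step_eq (d : PySem.Dict String (List (List (String × String)))) (conn : List (String × String)) :
    (let g := pvKey conn;
     (if d.contains g then d else d.insert g []).modify g [] (fun l => l ++ [conn]))
    = d.modify (pvKey conn) [] (fun l => l ++ [conn]) := by
  cases h : d.contains (pvKey conn) with
  | true => simp [h]
  | false =>
    simp only [h, Bool.false_eq_true, if_false]
    simp [PySem.Dict.modify, PySem.Dict.getD_insert_self, PySem.Dict.insert_insert_self,
      PySem.Dict.getD_of_not_contains d ([] : List (List (String × String))) h]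

theorem pv_fold_eq (l : List (List (String × String))) (d : PySem.Dict String (List (List (String × String)))) :
    l.foldl
      (fun groups conn =>
        let group_name := (PySem.Dict.mk conn).getD "group_name" "Default"
        let groups := if groups.contains group_name then groups else groups.insert group_name []
        groups.modify group_name [] (fun l => l ++ [conn])) d
    = l.foldl (fun d c => d.modify (pvKey c) [] (fun l => l ++ [c])) d := by
  induction l generalizing d with
  | nil => rfl
  | cons c t ih =>
    simp only [List.foldl_cons]
    rw [← ih]
    congr 1
    exact pv_step_eq d c

-- the bucket of each name in the folded dict is the filter of connections by that name
theorem pv_getD_fold (connections : List (List (String × String))) (n : String) :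
    (connections.foldl (fun d c => d.modify (pvKey c) [] (fun l => l ++ [c]))
      (PySem.Dict.empty : PySem.Dict String (List (List (String × String))))).getD n []
    = connections.filter (fun c => pvKey c == n) := by
  have h := PySem.Dict.getD_foldl_modify_append
      (l := connections.map (fun c => (pvKey c, c)))
      (d := (PySem.Dict.empty : PySem.Dict String (List (List (String × String))))) (c := n)
  rw [List.foldl_map] at h
  simpa [List.filter_map, List.map_map, Function.comp_def] using h

-- keys of the folded dict = ordered dedup of the key values
theorem pv_keys_fold (connections : List (List (String × String))) :
    (connections.foldl (fun d c => d.modify (pvKey c) [] (fun l => l ++ [c]))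
      (PySem.Dict.empty : PySem.Dict String (List (List (String × String))))).keys
    = PySem.List.dedup (connections.map pvKey) := by
  rw [PySem.Dict.keys_foldl_modify_key]
  simp [PySem.Set.update, PySem.Set.ofList_eq_foldl]

theorem pv_nodup_keys_fold (connections : List (List (String × String))) :
    (connections.foldl (fun d c => d.modify (pvKey c) [] (fun l => l ++ [c]))
      (PySem.Dict.empty : PySem.Dict String (List (List (String × String))))).keys.Nodup :=
  PySem.Dict.nodup_keys_foldl_modify_key connections pvKey [] (fun _ c l => l ++ [c]) PySem.Dict.empty PySem.Dict.nodup_keys_empty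

-- ===== VERDICT (by name: the statement is the Claim_ definition above) =====
theorem get_connection_groups_spec : Claim_equal_get_connection_groups := by
  intro connections _
  unfold Spec_get_connection_groups get_connection_groups get_connection_groups_alt
  rw [pv_fold_eq]
  rw [PySem.Dict.items_eq_map_keys _ (pv_nodup_keys_fold connections) []]
  rw [pv_keys_fold]
  exact List.map_congr_left (fun n _ => by rw [pv_getD_fold])
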